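-- pv_equiv track=rewrite | github.com/oolitaa/Mengurai_Merajut_Kata | Mengurai_Merajut_Kata.py | urai
-- ===== SOURCE A (Python) =====
-- def urai (kataUrai):
--     hasil = ''
--     for row in range (len(kataUrai)):
--         for col in range (row + 1):
--             hasil += kataUrai[col]
--             hasil += ""
--     hasil += ""
--     return hasil
-- ===== SOURCE B (Python) =====
-- def urai(kataUrai):
--     prefix = ''
--     hasil = ''
--     for c in kataUrai:
--         prefix += c
--         hasil += prefix
--     return hasil
-- ===== Notes on version B (the rewrite author's own statement) =====
-- stated objective: faster
-- what changed: Replaces the index-based nested loops (recomputing each prefix character by character via kataUrai[col]) with a single pass over the characters that threads a running prefix accumulator.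
import Mathlib
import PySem

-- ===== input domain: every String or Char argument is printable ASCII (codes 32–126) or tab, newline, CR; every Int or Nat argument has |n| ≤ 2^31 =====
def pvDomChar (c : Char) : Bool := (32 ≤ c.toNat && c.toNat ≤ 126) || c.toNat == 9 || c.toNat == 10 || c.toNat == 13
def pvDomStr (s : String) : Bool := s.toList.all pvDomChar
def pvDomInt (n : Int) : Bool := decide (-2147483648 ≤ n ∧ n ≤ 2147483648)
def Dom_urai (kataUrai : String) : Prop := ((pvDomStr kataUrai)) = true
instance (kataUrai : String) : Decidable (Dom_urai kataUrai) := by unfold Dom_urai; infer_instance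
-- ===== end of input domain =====

-- B replaces A's nested index loops with a single pass threading a running prefix (simpler/faster by a constant factor).

-- ===== PORT A =====
-- literal transliteration: nested for-loops over range(len), range(row+1), indexing kataUrai[col] (always in range)
def urai (kataUrai : String) : String :=
  let cs := kataUrai.toList
  let hasil : List Char :=
    (PySem.List.pyRange 0 (cs.length : Int) 1).foldl (fun h row =>
      (PySem.List.pyRange 0 (row + 1) 1).foldl (fun h2 col =>
        h2 ++ [PySem.List.pyGetD cs col ' ']) h) []
  String.ofList hasil

-- ===== PORT B =====
-- single pass: thread (prefix, hasil); prefix += c, hasil += prefix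
def urai_alt (kataUrai : String) : String :=
  let r := kataUrai.toList.foldl
    (fun (st : List Char × List Char) c =>
      let p := st.1 ++ [c]
      (p, st.2 ++ p)) ([], [])
  String.ofList r.2

-- ===== PRECONDITION & SPEC =====
def Spec_urai (kataUrai : String) (out : String) : Prop := out = urai_alt kataUrai
instance (kataUrai : String) (out : String) : Decidable (Spec_urai kataUrai out) := by unfold Spec_urai; infer_instance

-- ===== CLAIM (what is proved, stated in full; the proofs are below) =====
def Claim_equal_urai : Prop := ∀ (kataUrai : String), Dom_urai kataUrai → Spec_urai kataUrai (urai kataUrai)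

-- ===== LEMMAS AND PROOFS =====

/-- Concatenation of growing prefixes continuing an already-built prefix `p`. -/
def gPref (p : List Char) : List Char → List Char
  | [] => []
  | c :: t => (p ++ [c]) ++ gPref (p ++ [c]) t

theorem gPref_snoc (xs : List Char) (p : List Char) (c : Char) :
    gPref p (xs ++ [c]) = gPref p xs ++ (p ++ xs ++ [c]) := by
  induction xs generalizing p with
  | nil => simp [gPref]
  | cons x t ih => simp [gPref, ih, List.append_assoc]

theorem b_fold (cs p h : List Char) :
    cs.foldl (fun (st : List Char × List Char) c =>
      let q := st.1 ++ [c]; (q, st.2 ++ q)) (p, h)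
    = (p ++ cs, h ++ gPref p cs) := by
  induction cs generalizing p h with
  | nil => simp [gPref]
  | cons c t ih => simp [gPref, ih, List.append_assoc]

theorem map_getD_range (cs : List Char) (n : Nat) (hn : n ≤ cs.length) :
    (List.range n).map (fun k => cs.getD k ' ') = cs.take n := by
  apply List.ext_getElem
  · simp [hn]
  · intro i h1 h2
    have hi' : i < cs.length := by
      simp at h2; omega
    simp [List.getD, List.getElem?_eq_getElem hi']

theorem a_inner (cs h : List Char) (r : Nat) (hr : r < cs.length) :
    (PySem.List.pyRange 0 ((r : Int) + 1) 1).foldl (fun h2 col =>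
        h2 ++ [PySem.List.pyGetD cs col ' ']) h
    = h ++ cs.take (r + 1) := by
  have : ((r : Int) + 1) = ((r + 1 : Nat) : Int) := by push_cast; ring
  rw [this, PySem.List.pyRange_zero_nat, List.foldl_map,
      PySem.List.foldl_append_singleton_eq_map, ← map_getD_range cs (r+1) (by omega)]
  simp

theorem a_outer (cs : List Char) (n : Nat) (hn : n ≤ cs.length) :
    (List.range n).foldl (fun h r =>
      h ++ cs.take (r + 1)) ([] : List Char) = gPref [] (cs.take n) := by
  induction n with
  | zero => simp [gPref]
  | succ m ih =>
    have hm : m < cs.length := by omega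
    rw [List.range_succ, List.foldl_append, ih (by omega)]
    have htake : cs.take (m + 1) = cs.take m ++ [cs[m]] := by
      rw [List.take_add_one]
      simp [List.getElem?_eq_getElem hm]
    rw [htake, gPref_snoc]
    simp

theorem a_whole (cs : List Char) :
    (PySem.List.pyRange 0 (cs.length : Int) 1).foldl (fun h row =>
      (PySem.List.pyRange 0 (row + 1) 1).foldl (fun h2 col =>
        h2 ++ [PySem.List.pyGetD cs col ' ']) h) ([] : List Char)
    = gPref [] cs := by
  rw [PySem.List.pyRange_zero_nat, List.foldl_map]
  have hcong : (List.range cs.length).foldl (fun h (r : Nat) =>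
      (PySem.List.pyRange 0 ((r : Int) + 1) 1).foldl (fun h2 col =>
        h2 ++ [PySem.List.pyGetD cs col ' ']) h) ([] : List Char)
      = (List.range cs.length).foldl (fun h r => h ++ cs.take (r + 1)) [] := by
    apply PySem.List.foldl_congr_mem
    intro h r hr
    exact a_inner cs h r (by simpa using List.mem_range.mp hr)
  rw [hcong, a_outer cs cs.length le_rfl, List.take_length]

-- ===== VERDICT (by name: the statement is the Claim_ definition above) =====
theorem urai_spec : Claim_equal_urai := by
  intro s _
  unfold Spec_urai urai urai_alt
  dsimp only
  rw [b_fold, a_whole]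
  simp
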